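-- pv_equiv track=rewrite | github.com/gvwilson/sdxpy | src/compress/varlen_calc.py | count_packed
-- ===== SOURCE A (Python) =====
-- NYBBLE_RANGE = 2 ** 7
--
-- BITS_PER_NYBBLE = 4
--
-- def count_packed(counts):
--     """Calculate space required for nybble representation."""
--     used_per_nybble = NYBBLE_RANGE
--     remaining = len(counts)
--     result = 0
--     i = 1
--     while remaining:
--         chunk = used_per_nybble ** i
--         if remaining < chunk:
--             result += remaining * i
--             remaining = 0
--         else:
--             result += chunk * i
--             remaining -= chunk
--         i += 1
--     if result % 2 == 1:
--         result += 1
--     return (result * BITS_PER_NYBBLE) // 2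
-- ===== SOURCE B (Python) =====
-- NYBBLE_RANGE = 2 ** 7
--
-- BITS_PER_NYBBLE = 4
--
-- def count_packed(counts):
--     """Calculate space required for nybble representation (closed-form bucket sums)."""
--     n = len(counts)
--     k = 0
--     cap = 0  # 128 + 128**2 + ... + 128**k, capacity of the full buckets
--     while cap + NYBBLE_RANGE ** (k + 1) <= n:
--         k += 1
--         cap += NYBBLE_RANGE ** k
--     # closed form for sum_{i=1..k} i * 128**i
--     full = (k * NYBBLE_RANGE ** (k + 2) + NYBBLE_RANGE - (k + 1) * NYBBLE_RANGE ** (k + 1)) // (NYBBLE_RANGE - 1) ** 2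
--     result = full + (n - cap) * (k + 1)
--     result += result % 2
--     return result * BITS_PER_NYBBLE // 2
-- ===== Notes on version B (the rewrite author's own statement) =====
-- stated objective: alternative
-- what changed: Replaces A's chunk-by-chunk subtraction loop (which also accumulates per-bucket costs) with a direct search for the top bucket level k plus a closed-form geometric-series formula for the full buckets' cost; the remaining count is never mutated.
import Mathlib
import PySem

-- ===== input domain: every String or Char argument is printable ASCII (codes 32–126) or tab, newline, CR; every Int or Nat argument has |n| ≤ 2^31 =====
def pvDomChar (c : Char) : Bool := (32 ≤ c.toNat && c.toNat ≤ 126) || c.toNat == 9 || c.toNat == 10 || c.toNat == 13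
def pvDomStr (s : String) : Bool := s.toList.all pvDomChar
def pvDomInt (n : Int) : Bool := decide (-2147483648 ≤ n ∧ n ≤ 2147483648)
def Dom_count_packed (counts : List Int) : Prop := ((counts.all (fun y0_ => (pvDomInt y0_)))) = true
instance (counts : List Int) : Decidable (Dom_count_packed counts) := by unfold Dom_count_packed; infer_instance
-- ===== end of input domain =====

-- B differs from A structurally: it finds the top bucket level k by accumulating capacity
-- (never mutating the remaining count) and sums the full buckets' cost with a closed form.

-- ===== PORT A =====
-- A's while loop: state (remaining, i, result); chunk = 128 ^ i.
def countLoopA (remaining i result : Nat) : Nat :=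
  if h : remaining = 0 then result
  else
    let chunk := 128 ^ i
    if _hlt : remaining < chunk then result + remaining * i
    else countLoopA (remaining - chunk) (i + 1) (result + chunk * i)
termination_by remaining
decreasing_by
  have hc : 0 < 128 ^ i := pow_pos (by norm_num : (0:Nat) < 128) i
  omega

def count_packed (counts : List Int) : Int :=
  let result := countLoopA counts.length 1 0
  let result := if result % 2 = 1 then result + 1 else result
  ((result * 4) / 2 : Nat)

-- ===== PORT B =====
-- B's while loop: grow (k, cap) while the next full bucket still fits below n.
def kLoopB (n cap k : Nat) : Nat × Nat :=
  if h : cap + 128 ^ (k + 1) ≤ n then kLoopB n (cap + 128 ^ (k + 1)) (k + 1) else (k, cap)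
termination_by n - cap
decreasing_by
  have hc : 0 < 128 ^ (k + 1) := pow_pos (by norm_num : (0:Nat) < 128) _
  omega

def count_packed_alt (counts : List Int) : Int :=
  let n := counts.length
  let kc := kLoopB n 0 0
  let k := kc.1
  let cap := kc.2
  -- closed form for sum_{i=1..k} i * 128^i (exact: the subtraction never truncates)
  let full := (k * 128 ^ (k + 2) + 128 - (k + 1) * 128 ^ (k + 1)) / 16129
  let result := full + (n - cap) * (k + 1)
  let result := result + result % 2
  ((result * 4) / 2 : Nat)

-- ===== PRECONDITION & SPEC =====
def Spec_count_packed (counts : List Int) (out : Int) : Prop := out = count_packed_alt counts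
instance (counts : List Int) (out : Int) : Decidable (Spec_count_packed counts out) := by unfold Spec_count_packed; infer_instance

-- ===== CLAIM (what is proved, stated in full; the proofs are below) =====
def Claim_equal_count_packed : Prop := ∀ (counts : List Int), Dom_count_packed counts → Spec_count_packed counts (count_packed counts)

-- ===== LEMMAS AND PROOFS =====

-- sum_{i=1..k} i * 128^i, the mathematical reference value
def bucketSum : Nat → Nat
  | 0 => 0
  | k + 1 => bucketSum k + (k + 1) * 128 ^ (k + 1)

-- accumulator lemma for A's loop
theorem countLoopA_acc (r : Nat) : ∀ (i res : Nat), countLoopA r i res = res + countLoopA r i 0 := by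
  induction r using Nat.strong_induction_on with
  | _ r ih =>
    intro i res
    rw [countLoopA, countLoopA]
    by_cases h0 : r = 0
    · simp [h0]
    · simp only [h0, dif_neg, not_false_iff]
      by_cases hlt : r < 128 ^ i
      · simp [hlt]
      · have hc : 0 < 128 ^ i := pow_pos (by norm_num : (0:Nat) < 128) i
        simp only [hlt, dif_neg, not_false_iff]
        rw [ih (r - 128 ^ i) (by omega) (i + 1) (res + 128 ^ i * i),
            ih (r - 128 ^ i) (by omega) (i + 1) (0 + 128 ^ i * i)]
        omega

-- A's loop from level k+1 equals B's bucket decomposition from state (cap, k)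
theorem loop_eq_kLoop (n : Nat) : ∀ (cap k : Nat), cap ≤ n →
    countLoopA (n - cap) (k + 1) 0 + bucketSum k =
      bucketSum (kLoopB n cap k).1 + (n - (kLoopB n cap k).2) * ((kLoopB n cap k).1 + 1) := by
  have H : ∀ m cap k, n - cap ≤ m → cap ≤ n →
      countLoopA (n - cap) (k + 1) 0 + bucketSum k =
        bucketSum (kLoopB n cap k).1 + (n - (kLoopB n cap k).2) * ((kLoopB n cap k).1 + 1) := by
    intro m
    induction m with
    | zero =>
      intro cap k hm hcap
      have hnc : n - cap = 0 := by omega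
      have hc : 0 < 128 ^ (k + 1) := pow_pos (by norm_num : (0:Nat) < 128) _
      rw [kLoopB]
      have hnot : ¬ (cap + 128 ^ (k + 1) ≤ n) := by omega
      simp only [hnot, dif_neg, not_false_iff]
      rw [hnc, countLoopA]
      simp
    | succ m ihm =>
      intro cap k hm hcap
      have hc : 0 < 128 ^ (k + 1) := pow_pos (by norm_num : (0:Nat) < 128) _
      rw [kLoopB]
      by_cases h : cap + 128 ^ (k + 1) ≤ n
      · simp only [h, dif_pos]
        have hr0 : n - cap ≠ 0 := by omega
        have hrlt : ¬ (n - cap < 128 ^ (k + 1)) := by omega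
        rw [countLoopA]
        simp only [hr0, dif_neg, not_false_iff, hrlt]
        rw [countLoopA_acc]
        have hsub : n - cap - 128 ^ (k + 1) = n - (cap + 128 ^ (k + 1)) := by omega
        rw [hsub]
        have := ihm (cap + 128 ^ (k + 1)) (k + 1) (by omega) h
        have hbs : bucketSum (k + 1) = bucketSum k + (k + 1) * 128 ^ (k + 1) := rfl
        have hcm : 128 ^ (k + 1) * (k + 1) = (k + 1) * 128 ^ (k + 1) := Nat.mul_comm _ _
        omega
      · simp only [h, dif_neg, not_false_iff]
        by_cases hr0 : n - cap = 0
        · rw [hr0, countLoopA]; simp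
        · rw [countLoopA]
          have hrlt : n - cap < 128 ^ (k + 1) := by omega
          simp only [hr0, dif_neg, not_false_iff, hrlt, dite_true]
          omega
  intro cap k hcap
  exact H (n - cap) cap k (le_refl _) hcap

-- closed form: 16129 * bucketSum k + (k+1)*128^(k+1) = k*128^(k+2) + 128
theorem bucketSum_identity (k : Nat) :
    16129 * bucketSum k + (k + 1) * 128 ^ (k + 1) = k * 128 ^ (k + 2) + 128 := by
  induction k with
  | zero => simp [bucketSum]
  | succ k ih =>
    have hbs : bucketSum (k + 1) = bucketSum k + (k + 1) * 128 ^ (k + 1) := rfl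
    have hp2 : 128 ^ (k + 2) = 128 * 128 ^ (k + 1) := by ring
    have hp3 : 128 ^ (k + 3) = 16384 * 128 ^ (k + 1) := by ring
    rw [hbs]
    nlinarith [ih, hp2, hp3]

theorem bucketSum_closed (k : Nat) :
    (k * 128 ^ (k + 2) + 128 - (k + 1) * 128 ^ (k + 1)) / 16129 = bucketSum k := by
  have h := bucketSum_identity k
  have hsub : k * 128 ^ (k + 2) + 128 - (k + 1) * 128 ^ (k + 1) = 16129 * bucketSum k := by omega
  rw [hsub]
  exact Nat.mul_div_cancel_left _ (by norm_num)

-- ===== VERDICT (by name: the statement is the Claim_ definition above) =====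
theorem count_packed_spec : Claim_equal_count_packed := by
  intro counts _
  simp only [Spec_count_packed, count_packed, count_packed_alt]
  have hmain := loop_eq_kLoop counts.length 0 0 (Nat.zero_le _)
  simp only [Nat.sub_zero, Nat.zero_add, bucketSum] at hmain
  rw [bucketSum_closed]
  have hr : countLoopA counts.length 1 0 =
      bucketSum (kLoopB counts.length 0 0).1 +
        (counts.length - (kLoopB counts.length 0 0).2) * ((kLoopB counts.length 0 0).1 + 1) := by
    omega
  rw [hr]
  norm_cast
  split_ifs with h <;> omega
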